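-- pv_equiv track=rewrite | github.com/CongLabCode/DPAM | parse_domains.py | get_domain_range
-- ===== SOURCE A (Python) =====
-- def get_domain_range(resids):
--     segs = []
--     resids.sort()
--     for resid in resids:
--         if not segs:
--             segs.append([resid])
--         else:
--             if resid > segs[-1][-1] + 1:
--                 segs.append([resid])
--             else:
--                 segs[-1].append(resid)
--     seg_string = []
--     for seg in segs:
--         start = str(seg[0])
--         end = str(seg[-1])
--         seg_string.append(start + '-' + end)
--     return ','.join(seg_string)
-- ===== SOURCE B (Python) =====
-- def get_domain_range(resids):
--     resids.sort()
--     u = sorted(set(resids))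
--     gaps = [(a, b) for a, b in zip(u, u[1:]) if b != a + 1]
--     starts = u[:1] + [b for a, b in gaps]
--     ends = [a for a, b in gaps] + u[-1:]
--     return ','.join(f'{s}-{e}' for s, e in zip(starts, ends))
-- ===== Notes on version B (the rewrite author's own statement) =====
-- stated objective: idiomatic
-- what changed: Replaces the explicit segment-list accumulation with a gap-detection pass: sort+dedupe, collect adjacent pairs with a gap, and zip the derived segment starts with the segment ends; both A and B sort resids in place and the equivalence proved is about the return value.
import Mathlib
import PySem

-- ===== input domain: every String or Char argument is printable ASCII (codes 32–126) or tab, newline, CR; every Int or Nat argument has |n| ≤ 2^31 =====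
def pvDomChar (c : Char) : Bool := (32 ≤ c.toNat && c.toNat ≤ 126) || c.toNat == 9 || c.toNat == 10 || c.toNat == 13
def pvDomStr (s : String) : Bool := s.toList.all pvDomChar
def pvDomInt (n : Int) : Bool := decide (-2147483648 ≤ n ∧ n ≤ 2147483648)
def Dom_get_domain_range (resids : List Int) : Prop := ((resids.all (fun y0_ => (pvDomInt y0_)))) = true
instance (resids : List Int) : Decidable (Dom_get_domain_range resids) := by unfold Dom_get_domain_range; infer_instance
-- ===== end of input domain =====

-- B groups the sorted distinct residues by gap detection on adjacent pairs instead of A's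
-- segment-list accumulation; both Pythons sort `resids` in place, and the equivalence proved
-- here is about the return value (the mutation is identical in A and B).

-- ===== PORT A =====
-- one loop iteration of A: append a new segment or extend the last one
def pyStepA (segs : List (List Int)) (resid : Int) : List (List Int) :=
  if segs = [] then segs ++ [[resid]]
  else if resid > PySem.List.pyGetD (PySem.List.pyGetD segs (-1) []) (-1) 0 + 1 then
    segs ++ [[resid]]
  else
    segs.dropLast ++ [PySem.List.pyGetD segs (-1) [] ++ [resid]]

def get_domain_range (resids : List Int) : String :=
  let sortedResids := PySem.List.sorted resids (fun x => x) false
  let segs := sortedResids.foldl pyStepA []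
  let seg_string := segs.map (fun seg =>
    PySem.Int.toStr (PySem.List.pyGetD seg 0 0) ++ "-" ++ PySem.Int.toStr (PySem.List.pyGetD seg (-1) 0))
  PySem.Str.join "," seg_string

-- ===== PORT B =====
def get_domain_range_alt (resids : List Int) : String :=
  let u := PySem.List.sorted (PySem.Set.ofList resids) (fun x => x) false
  let gaps := (u.zip (PySem.List.slice u (some 1) none)).filter (fun p => decide (p.2 ≠ p.1 + 1))
  let starts := PySem.List.slice u none (some 1) ++ gaps.map (fun p => p.2)
  let ends := gaps.map (fun p => p.1) ++ PySem.List.slice u (some (-1)) none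
  PySem.Str.join "," ((starts.zip ends).map (fun p =>
    PySem.Int.toStr p.1 ++ "-" ++ PySem.Int.toStr p.2))

-- ===== PRECONDITION & SPEC =====
def Spec_get_domain_range (resids : List Int) (out : String) : Prop := out = get_domain_range_alt resids
instance (resids : List Int) (out : String) : Decidable (Spec_get_domain_range resids out) := by unfold Spec_get_domain_range; infer_instance

-- ===== CLAIM (what is proved, stated in full; the proofs are below) =====
def Claim_equal_get_domain_range : Prop := ∀ (resids : List Int), Dom_get_domain_range resids → Spec_get_domain_range resids (get_domain_range resids)

-- ===== LEMMAS AND PROOFS =====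

-- (start,end) pairs of the maximal runs, processing the tail of a sorted list with
-- current run (s..e); mirrors A's grouping condition `resid > last + 1`.
def goPairs (s e : Int) : List Int → List (Int × Int)
  | [] => [(s, e)]
  | y :: ys => if y > e + 1 then (s, e) :: goPairs y y ys else goPairs s y ys

-- A's segment lists, as a forward recursion with the current segment explicit
def segsOf (cur : List Int) : List Int → List (List Int)
  | [] => [cur]
  | y :: ys => if y > cur.getLastD 0 + 1 then cur :: segsOf [y] ys else segsOf (cur ++ [y]) ys

-- drop adjacent duplicates, previous element explicit
def dedupAdj (p : Int) : List Int → List Int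
  | [] => []
  | y :: ys => if y = p then dedupAdj p ys else y :: dedupAdj y ys

lemma pyGetD_neg_one_eq_getLastD (l : List Int) (h : l ≠ []) :
    PySem.List.pyGetD l (-1) 0 = l.getLastD 0 := by
  rw [PySem.List.pyGetD_neg_one l 0 h, List.getLastD_eq_getLast?,
    List.getLast?_eq_some_getLast h, Option.getD_some]

lemma foldl_stepA (xs : List Int) : ∀ (done : List (List Int)) (cur : List Int), cur ≠ [] →
    xs.foldl pyStepA (done ++ [cur]) = done ++ segsOf cur xs := by
  induction xs with
  | nil => intro done cur h; simp [segsOf]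
  | cons y ys ih =>
    intro done cur h
    simp only [List.foldl_cons, segsOf]
    have hlast : PySem.List.pyGetD (done ++ [cur]) (-1) ([] : List Int) = cur :=
      PySem.List.pyGetD_neg_one_append_singleton done cur []
    have hne : done ++ [cur] ≠ [] := by simp
    have hcl := pyGetD_neg_one_eq_getLastD cur h
    by_cases hgt : y > cur.getLastD 0 + 1
    · have hstep : pyStepA (done ++ [cur]) y = (done ++ [cur]) ++ [[y]] := by
        unfold pyStepA; rw [if_neg hne, hlast, hcl, if_pos hgt]
      rw [hstep, ih (done ++ [cur]) [y] (by simp), if_pos hgt]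
      simp [List.append_assoc]
    · have hstep : pyStepA (done ++ [cur]) y = done ++ [cur ++ [y]] := by
        unfold pyStepA; rw [if_neg hne, hlast, hcl, if_neg hgt, List.dropLast_concat]
      rw [hstep, ih done (cur ++ [y]) (by simp), if_neg hgt]

lemma segsOf_map (render : Int → Int → String) (xs : List Int) :
    ∀ (cur : List Int), cur ≠ [] →
    (segsOf cur xs).map (fun seg =>
        render (PySem.List.pyGetD seg 0 0) (PySem.List.pyGetD seg (-1) 0)) =
    (goPairs (cur.headD 0) (cur.getLastD 0) xs).map (fun p => render p.1 p.2) := by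
  induction xs with
  | nil =>
    intro cur h
    cases cur with
    | nil => exact absurd rfl h
    | cons a t =>
      simp [segsOf, goPairs, PySem.List.pyGetD_zero_cons, pyGetD_neg_one_eq_getLastD _ h]
  | cons y ys ih =>
    intro cur h
    cases cur with
    | nil => exact absurd rfl h
    | cons a t =>
      simp only [segsOf, goPairs]
      by_cases hgt : y > (a :: t).getLastD 0 + 1
      · simp only [hgt, if_pos, List.map_cons]
        rw [ih [y] (by simp)]
        simp [PySem.List.pyGetD_zero_cons, pyGetD_neg_one_eq_getLastD _ h]
      · simp only [hgt, if_neg, not_false_iff]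
        have h1 : ((a :: t) ++ [y]).headD 0 = a := by simp
        have h2 : ((a :: t) ++ [y]).getLastD 0 = y := List.getLastD_concat
        rw [ih ((a :: t) ++ [y]) (by simp), h1, h2]
        simp

lemma goPairs_dedupAdj : ∀ (l : List Int) (s e : Int),
    goPairs s e l = goPairs s e (dedupAdj e l) := by
  intro l
  induction l with
  | nil => intro s e; rfl
  | cons y ys ih =>
    intro s e
    by_cases hey : y = e
    · subst hey
      simp only [dedupAdj, goPairs]
      have : ¬ (y > y + 1) := by omega
      rw [if_neg this]
      exact ih s y
    · simp only [dedupAdj, if_neg hey, goPairs]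
      by_cases hgt : y > e + 1
      · rw [if_pos hgt, if_pos hgt, ih y y]
      · rw [if_neg hgt, if_neg hgt, ih s y]

lemma mem_dedupAdj_subset : ∀ (l : List Int) (p x : Int), x ∈ dedupAdj p l → x ∈ l := by
  intro l
  induction l with
  | nil => intro p x h; simp [dedupAdj] at h
  | cons y ys ih =>
    intro p x h
    by_cases hey : y = p
    · simp only [dedupAdj, if_pos hey] at h
      exact List.mem_cons_of_mem _ (ih p x h)
    · simp only [dedupAdj, if_neg hey, List.mem_cons] at h
      rcases h with h | h
      · simp [h]
      · exact List.mem_cons_of_mem _ (ih y x h)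

lemma mem_dedupAdj_of_mem : ∀ (l : List Int) (p x : Int), x ∈ l → x = p ∨ x ∈ dedupAdj p l := by
  intro l
  induction l with
  | nil => intro p x h; simp at h
  | cons y ys ih =>
    intro p x h
    rcases List.mem_cons.mp h with h | h
    · by_cases hey : y = p
      · left; rw [h, hey]
      · right; simp [dedupAdj, if_neg hey, h]
    · by_cases hey : y = p
      · simpa [dedupAdj, if_pos hey] using ih p x h
      · rcases ih y x h with h' | h'
        · right; simp [dedupAdj, if_neg hey, h']
        · right; simp [dedupAdj, if_neg hey, h']

lemma pairwise_lt_dedupAdj : ∀ (l : List Int) (p : Int),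
    (p :: l).Pairwise (· ≤ ·) → (p :: dedupAdj p l).Pairwise (· < ·) := by
  intro l
  induction l with
  | nil => intro p _; simp [dedupAdj]
  | cons y ys ih =>
    intro p h
    rcases List.pairwise_cons.mp h with ⟨hall, htail⟩
    by_cases hey : y = p
    · subst hey
      simp only [dedupAdj]
      apply ih y
      exact List.pairwise_cons.mpr ⟨fun m hm => (List.pairwise_cons.mp htail).1 m hm, (List.pairwise_cons.mp htail).2⟩
    · have hpy : p < y := lt_of_le_of_ne (hall y (by simp)) (fun hh => hey hh.symm)
      simp only [dedupAdj, if_neg hey]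
      apply List.pairwise_cons.mpr
      refine ⟨?_, ih y htail⟩
      intro m hm
      rcases List.mem_cons.mp hm with hm | hm
      · rw [hm]; exact hpy
      · have hmys : m ∈ ys := mem_dedupAdj_subset ys y m hm
        exact lt_of_lt_of_le hpy ((List.pairwise_cons.mp htail).1 m hmys)

-- the strictly sorted distinct residues: sorted(set(resids)) = head-and-dedupAdj of sorted(resids)
lemma sorted_set_eq_dedup (resids : List Int) (x : Int) (xs : List Int)
    (hs : PySem.List.sorted resids (fun x => x) false = x :: xs) :
    PySem.List.sorted (PySem.Set.ofList resids) (fun x => x) false = x :: dedupAdj x xs := by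
  have hpw : (x :: xs).Pairwise (· ≤ ·) := by
    have := PySem.List.sorted_pairwise (xs := resids) (key := fun x => x)
    rw [hs] at this; exact this
  have hpwlt : (x :: dedupAdj x xs).Pairwise (· < ·) := pairwise_lt_dedupAdj xs x hpw
  apply PySem.List.sorted_eq_of_perm_of_pairwise_lt
  · -- permutation with set(resids)
    apply (List.perm_ext_iff_of_nodup (hpwlt.imp ne_of_lt) (PySem.Set.nodup_ofList resids)).mpr
    intro a
    have hmem : a ∈ x :: dedupAdj x xs ↔ a ∈ x :: xs := by
      constructor
      · intro h
        rcases List.mem_cons.mp h with h | h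
        · simp [h]
        · exact List.mem_cons_of_mem _ (mem_dedupAdj_subset xs x a h)
      · intro h
        rcases List.mem_cons.mp h with h | h
        · simp [h]
        · rcases mem_dedupAdj_of_mem xs x a h with h' | h'
          · simp [h']
          · exact List.mem_cons_of_mem _ h'
    rw [hmem, ← hs, PySem.List.mem_sorted, PySem.Set.mem_ofList]
  · exact hpwlt

-- the gap-pair characterisation of goPairs on a strictly increasing tail
lemma goPairs_zip : ∀ (l : List Int) (s prev : Int), (prev :: l).Pairwise (· < ·) →
    goPairs s prev l =
    (s :: (((prev :: l).zip l).filter (fun p => decide (p.2 ≠ p.1 + 1))).map (fun p => p.2)).zip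
      ((((prev :: l).zip l).filter (fun p => decide (p.2 ≠ p.1 + 1))).map (fun p => p.1) ++
        [(prev :: l).getLastD 0]) := by
  intro l
  induction l with
  | nil => intro s prev _; simp [goPairs]
  | cons y ys ih =>
    intro s prev hpw
    rcases List.pairwise_cons.mp hpw with ⟨hall, htail⟩
    have hlt : prev < y := hall y (by simp)
    simp only [goPairs]
    by_cases hgt : y > prev + 1
    · have hne : (decide (y ≠ prev + 1)) = true := by simp; omega
      rw [if_pos hgt, ih y y htail]
      simp only [List.zip_cons_cons, List.filter_cons, hne, if_pos, List.map_cons]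
      simp [List.zip_cons_cons]
    · have hne : (decide (y ≠ prev + 1)) = false := by
        simp only [decide_eq_false_iff_not, not_not]; omega
      rw [if_neg hgt, ih s y htail]
      simp only [List.zip_cons_cons, List.filter_cons, hne]
      simp

lemma drop_length_sub_one_eq {α : Type} (d : α) (l : List α) (h : l ≠ []) :
    l.drop (l.length - 1) = [l.getLastD d] := by
  induction l with
  | nil => exact absurd rfl h
  | cons a t ih =>
    cases t with
    | nil => simp
    | cons b t' =>
      have := ih (by simp)
      simpa [List.getLastD] using this

-- ===== VERDICT (by name: the statement is the Claim_ definition above) =====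
theorem get_domain_range_spec : Claim_equal_get_domain_range := by
  intro resids _
  unfold Spec_get_domain_range get_domain_range get_domain_range_alt
  dsimp only
  cases hs : PySem.List.sorted resids (fun x => x) false with
  | nil =>
    have hr : resids = [] := (PySem.List.sorted_eq_nil_iff resids (fun x => x) false).mp hs
    simp [hr, PySem.List.sorted, PySem.List.slice, PySem.Set.ofList]
  | cons x xs =>
    have hpw : (x :: xs).Pairwise (· ≤ ·) := by
      have := PySem.List.sorted_pairwise (xs := resids) (key := fun x => x)
      rw [hs] at this; exact this
    have hA1 : (x :: xs).foldl pyStepA [] = segsOf [x] xs := by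
      have h0 : pyStepA [] x = [[x]] := by simp [pyStepA]
      calc (x :: xs).foldl pyStepA [] = xs.foldl pyStepA ([] ++ [[x]]) := by simp [h0]
        _ = [] ++ segsOf [x] xs := foldl_stepA xs [] [x] (by simp)
        _ = segsOf [x] xs := by simp
    have hA2 := segsOf_map (fun a b => PySem.Int.toStr a ++ "-" ++ PySem.Int.toStr b) xs [x] (by simp)
    have hdedup := goPairs_dedupAdj xs x x
    have hu := sorted_set_eq_dedup resids x xs hs
    have hpwlt : (x :: dedupAdj x xs).Pairwise (· < ·) := pairwise_lt_dedupAdj xs x hpw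
    have hB := goPairs_zip (dedupAdj x xs) x x hpwlt
    rw [hA1, hu]
    simp only [hA2, List.headD_cons]
    rw [show ([x] : List Int).getLastD 0 = x from rfl, hdedup, hB]
    rw [PySem.List.slice_from_one, PySem.List.slice_from_neg_one,
      PySem.List.slice_to (x :: dedupAdj x xs) (by omega : (0:Int) ≤ 1),
      drop_length_sub_one_eq 0 (x :: dedupAdj x xs) (by simp)]
    simp
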